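-- pv_equiv track=rewrite | github.com/fortesg/fortrantestgenerator | generator.py | stringMask
-- ===== SOURCE A (Python) =====
-- def stringMask(line):
--     mask = []
--     inString = False
--     quote = ''
--     escaped = False
--     for c in line:
--         if inString:
--             if escaped:
--                 escaped = False
--             elif c == '\\':
--                 escaped = True
--             elif c == quote and not escaped:
--                     inString = False
--             mask.append(True)
--         else:
--             if c == "'" or c == '"':
--                 inString = True
--                 quote = c
--                 escaped = False
--             mask.append(inString)
--
--     return mask
-- ===== SOURCE B (Python) =====
-- def stringMask(line):
--     # Span-based: find each string literal's closing quote, mark the whole span True at once.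
--     n = len(line)
--     mask = []
--     i = 0
--     while i < n:
--         c = line[i]
--         if c == "'" or c == '"':
--             j = i + 1
--             while j < n:
--                 if line[j] == '\\':
--                     j += 2
--                 elif line[j] == c:
--                     j += 1
--                     break
--                 else:
--                     j += 1
--             j = min(j, n)
--             mask.extend([True] * (j - i))
--             i = j
--         else:
--             mask.append(False)
--             i += 1
--     return mask
-- ===== Notes on version B (the rewrite author's own statement) =====
-- stated objective: alternative
-- what changed: Replaced the per-character inString/quote/escaped state machine with a span-based scan that locates each literal's closing quote (skipping escapes two at a time) and marks the whole span True in one step.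
import Mathlib
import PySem

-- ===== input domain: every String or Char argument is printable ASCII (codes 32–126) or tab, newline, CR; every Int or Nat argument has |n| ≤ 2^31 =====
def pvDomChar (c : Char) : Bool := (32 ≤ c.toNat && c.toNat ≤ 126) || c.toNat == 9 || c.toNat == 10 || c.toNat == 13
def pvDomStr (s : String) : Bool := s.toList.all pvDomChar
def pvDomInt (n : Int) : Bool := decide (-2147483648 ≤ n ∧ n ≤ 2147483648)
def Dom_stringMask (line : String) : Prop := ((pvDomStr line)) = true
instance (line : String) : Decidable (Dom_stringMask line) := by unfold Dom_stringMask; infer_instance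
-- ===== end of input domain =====

-- B replaces A's per-character state machine by a span scan that jumps to each
-- literal's closing quote and masks the whole span at once (objective: alternative).

-- ===== PORT A =====
-- state: (mask, inString, quote, escaped); Python's quote starts as '' which is never
-- compared while inString is false, so an arbitrary Char stands in for it.
def pvStepA (st : List Bool × Bool × Char × Bool) (c : Char) : List Bool × Bool × Char × Bool :=
  let (mask, inString, quote, escaped) := st
  if inString then
    if escaped then (mask ++ [true], inString, quote, false)
    else if c = '\\' then (mask ++ [true], inString, quote, true)
    else if c = quote ∧ escaped = false then (mask ++ [true], false, quote, escaped)
    else (mask ++ [true], inString, quote, escaped)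
  else
    if c = '\'' ∨ c = '"' then (mask ++ [true], true, c, false)
    else (mask ++ [false], inString, quote, escaped)

def stringMask (line : String) : List Bool :=
  (line.toList.foldl pvStepA ([], false, ' ', false)).1

-- ===== PORT B =====
-- inner while-loop of Source B: number of characters consumed after the opening quote
-- (string body plus closing quote, or to end of line; a trailing backslash still
-- consumes at most what is there — Source B's min(j, n) cap is the [c] => 1 case).
def pvFindClose (q : Char) : List Char → Nat
  | [] => 0
  | c :: rest =>
    if c = '\\' then
      match rest with
      | [] => 1
      | _ :: rest' => 2 + pvFindClose q rest'
    else if c = q then 1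
    else 1 + pvFindClose q rest

-- outer while-loop of Source B, on the remaining characters
def pvMaskGo : List Char → List Bool
  | [] => []
  | c :: rest =>
    if c = '\'' ∨ c = '"' then
      let k := pvFindClose c rest
      List.replicate (k + 1) true ++ pvMaskGo (rest.drop k)
    else
      false :: pvMaskGo rest
termination_by l => l.length
decreasing_by
  · simp only [List.length_cons, List.length_drop]; omega
  · simp

def stringMask_alt (line : String) : List Bool := pvMaskGo line.toList

-- ===== PRECONDITION & SPEC =====
def Spec_stringMask (line : String) (out : List Bool) : Prop := out = stringMask_alt line
instance (line : String) (out : List Bool) : Decidable (Spec_stringMask line out) := by unfold Spec_stringMask; infer_instance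

-- ===== CLAIM (what is proved, stated in full; the proofs are below) =====
def Claim_equal_stringMask : Prop := ∀ (line : String), Dom_stringMask line → Spec_stringMask line (stringMask line)

-- ===== LEMMAS AND PROOFS =====

-- the bits A's fold appends from a given state onward
def pvEmitA (inString : Bool) (quote : Char) (escaped : Bool) : List Char → List Bool
  | [] => []
  | c :: l =>
    if inString then
      if escaped then true :: pvEmitA true quote false l
      else if c = '\\' then true :: pvEmitA true quote true l
      else if c = quote ∧ escaped = false then true :: pvEmitA false quote escaped l
      else true :: pvEmitA true quote escaped l
    else
      if c = '\'' ∨ c = '"' then true :: pvEmitA true c false l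
      else false :: pvEmitA false quote escaped l

theorem pvFold_emit (l : List Char) : ∀ (mask : List Bool) (s : Bool) (q : Char) (e : Bool),
    (l.foldl pvStepA (mask, s, q, e)).1 = mask ++ pvEmitA s q e l := by
  induction l with
  | nil => intro mask s q e; simp [pvEmitA]
  | cons c l ih =>
    intro mask s q e
    cases s <;> cases e <;>
      simp only [List.foldl_cons, pvStepA, pvEmitA] <;>
      split_ifs <;> (try contradiction) <;> simp [ih]

-- mutual characterisation of pvEmitA by B's functions, by induction on a length bound
theorem pvEmit_char (n : Nat) : ∀ (l : List Char), l.length ≤ n →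
    (∀ (q : Char) (e : Bool), pvEmitA false q e l = pvMaskGo l) ∧
    (∀ (q : Char), pvEmitA true q false l =
        List.replicate (pvFindClose q l) true ++ pvMaskGo (l.drop (pvFindClose q l))) := by
  induction n with
  | zero =>
    intro l hl
    have : l = [] := List.eq_nil_of_length_eq_zero (Nat.le_zero.mp hl)
    subst this
    exact ⟨fun q e => by simp [pvEmitA, pvMaskGo],
           fun q => by simp [pvEmitA, pvMaskGo, pvFindClose]⟩
  | succ n ih =>
    intro l hl
    match l with
    | [] =>
      exact ⟨fun q e => by simp [pvEmitA, pvMaskGo],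
             fun q => by simp [pvEmitA, pvMaskGo, pvFindClose]⟩
    | c :: t =>
      have ht : t.length ≤ n := by simpa using hl
      constructor
      · intro q e
        by_cases hq : c = '\'' ∨ c = '"'
        · simp only [pvEmitA, pvMaskGo, if_pos hq]
          rw [(ih t ht).2 c]
          simp [List.replicate_succ]
        · simp [pvEmitA, pvMaskGo, hq, (ih t ht).1 q e]
      · intro q
        by_cases hb : c = '\\'
        · subst hb
          match t with
          | [] => simp [pvEmitA, pvFindClose, pvMaskGo]
          | d :: t' =>
            have ht' : t'.length ≤ n := by simp at ht; omega
            rw [show pvFindClose q ('\\' :: d :: t') = 2 + pvFindClose q t' from by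
              simp [pvFindClose]]
            simp only [pvEmitA, if_true]
            rw [(ih t' ht').2 q, Nat.add_comm 2]
            simp [List.replicate_succ]
        · by_cases hq : c = q
          · subst hq
            rw [show pvFindClose c (c :: t) = 1 from by
              rw [pvFindClose.eq_def]; simp [hb]]
            simp [pvEmitA, hb, (ih t ht).1 c false, List.replicate_succ]
          · rw [show pvFindClose q (c :: t) = 1 + pvFindClose q t from by
              rw [pvFindClose.eq_def]; simp [hb, hq]]
            simp [pvEmitA, hb, hq, (ih t ht).2 q, Nat.add_comm 1, List.replicate_succ]

-- ===== VERDICT (by name: the statement is the Claim_ definition above) =====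
theorem stringMask_spec : Claim_equal_stringMask := by
  intro line _
  show stringMask line = stringMask_alt line
  unfold stringMask stringMask_alt
  rw [pvFold_emit]
  simpa using (pvEmit_char line.toList.length line.toList le_rfl).1 ' ' false
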